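-- pv_equiv track=rewrite | github.com/miliar/Code_Jam_Webscraper | solutions_python/solutions_year17_round0_nr3/1173.py | rec
-- ===== SOURCE A (Python) =====
-- import math
--
-- def rec(n, k) :
-- 	if k == 0 :
-- 		return [None, None]
-- 	if k == 1 :
-- 		return [math.ceil((n-1)/2), math.floor((n-1)/2)]
--
-- 	a_n = math.ceil((n-1)/2)
-- 	a_k = math.ceil((k-1)/2)
-- 	b_n = math.floor((n-1)/2)
-- 	b_k = math.floor((k-1)/2)
--
-- 	if a_k > b_k :
-- 		return rec(a_n, a_k)
-- 	elif b_n < a_n :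
-- 		return rec(b_n, b_k)
-- 	else :
-- 		return rec(a_n, a_k)
--
-- 	if b == [None, None] or a != [None,None] and a < b :
-- 		return a
-- 	return b
-- ===== SOURCE B (Python) =====
-- def rec(n, k):
--     # Iterative halving: same three-way branch of A collapses to "halve n and k,
--     # rounding down (odd k: on (n-1), (k-1); even k: on n, k)".
--     if k == 0:
--         return [None, None]
--     while k > 1:
--         if k % 2:
--             n, k = (n - 1) // 2, (k - 1) // 2
--         else:
--             n, k = n // 2, k // 2
--     return [n // 2, (n - 1) // 2]
-- ===== Notes on version B (the rewrite author's own statement) =====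
-- stated objective: simpler
-- what changed: Replaced A's three-way recursive branch on ceil/floor pairs by an iterative while-loop that just halves n and k (rounding down, on n-1/k-1 when k is odd), with a single closed-form base case; no math module and no recursion.
-- outside the precondition, e.g. on rec(5, -1): A raises RecursionError, B returns [2, 2]
import Mathlib
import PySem

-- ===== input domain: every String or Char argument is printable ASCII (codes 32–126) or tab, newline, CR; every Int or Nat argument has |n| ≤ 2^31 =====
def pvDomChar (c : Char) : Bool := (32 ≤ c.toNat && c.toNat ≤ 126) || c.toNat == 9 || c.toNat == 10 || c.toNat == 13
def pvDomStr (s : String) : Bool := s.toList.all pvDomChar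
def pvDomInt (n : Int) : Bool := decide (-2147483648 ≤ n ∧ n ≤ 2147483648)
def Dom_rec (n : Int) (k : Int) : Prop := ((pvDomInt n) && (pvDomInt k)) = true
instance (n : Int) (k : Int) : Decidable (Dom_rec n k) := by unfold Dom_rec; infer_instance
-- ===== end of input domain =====

-- B replaces A's three-way recursion on ceil/floor pairs by a simple iterative halving loop (objective: simpler).

-- ===== PORT A =====
-- math.ceil(m/2) / math.floor(m/2); exact on |m| ≤ 2^31 where the float m/2 is exact
def pyCeilHalf (m : Int) : Int := -(PySem.Int.floordiv (-m) 2)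
def pyFloorHalf (m : Int) : Int := PySem.Int.floordiv m 2

def rec (n : Int) (k : Int) : List (Option Int) :=
  if k = 0 then [none, none]
  else if k = 1 then [some (pyCeilHalf (n - 1)), some (pyFloorHalf (n - 1))]
  else if _hk : k < 2 then [none, none]  -- totality guard: the Python recurses forever here (k < 0); excluded by Pre_rec
  else
    let a_n := pyCeilHalf (n - 1)
    let a_k := pyCeilHalf (k - 1)
    let b_n := pyFloorHalf (n - 1)
    let b_k := pyFloorHalf (k - 1)
    if a_k > b_k then rec a_n a_k
    else if b_n < a_n then rec b_n b_k
    else rec a_n a_k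
termination_by k.toNat
decreasing_by
  all_goals
    simp only [pyCeilHalf, pyFloorHalf,
      PySem.Int.floordiv_eq_ediv_of_pos (show (0:Int) < 2 by norm_num)]
    omega

-- ===== PORT B =====
-- the while-loop of Source B: returns the final (n, k) state
def recAltLoop (n : Int) (k : Int) : Int × Int :=
  if _h : 1 < k then
    if PySem.Int.mod k 2 ≠ 0 then
      recAltLoop (PySem.Int.floordiv (n - 1) 2) (PySem.Int.floordiv (k - 1) 2)
    else
      recAltLoop (PySem.Int.floordiv n 2) (PySem.Int.floordiv k 2)
  else (n, k)
termination_by k.toNat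
decreasing_by
  all_goals
    simp only [PySem.Int.floordiv_eq_ediv_of_pos (show (0:Int) < 2 by norm_num)]
    omega

def rec_alt (n : Int) (k : Int) : List (Option Int) :=
  if k = 0 then [none, none]
  else
    let p := recAltLoop n k
    [some (PySem.Int.floordiv p.1 2), some (PySem.Int.floordiv (p.1 - 1) 2)]

-- ===== PRECONDITION & SPEC =====
-- Pre_ excludes k < 0, where the Python A recurses forever (RecursionError)
def Pre_rec (n : Int) (k : Int) : Prop := 0 ≤ k
instance (n : Int) (k : Int) : Decidable (Pre_rec n k) := by unfold Pre_rec; infer_instance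
def pvWitness_rec : Int × Int := (7, 3)
def Spec_rec (n : Int) (k : Int) (out : List (Option Int)) : Prop := out = rec_alt n k
instance (n : Int) (k : Int) (out : List (Option Int)) : Decidable (Spec_rec n k out) := by unfold Spec_rec; infer_instance

-- ===== CLAIM (what is proved, stated in full; the proofs are below) =====
def Claim_equal_rec : Prop := ∀ (n : Int) (k : Int), Dom_rec n k → Pre_rec n k → Spec_rec n k (rec n k)

-- ===== LEMMAS AND PROOFS =====

theorem fd2_eq (a : Int) : PySem.Int.floordiv a 2 = a / 2 :=
  PySem.Int.floordiv_eq_ediv_of_pos (by norm_num)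

theorem md2_eq (a : Int) : PySem.Int.mod a 2 = a % 2 :=
  PySem.Int.mod_eq_emod_of_pos (by norm_num)

-- A, k even ≥ 2: takes the first branch (a_k > b_k), landing on (n/2, k/2)
theorem rec_step_even (n k : Int) (hk : 2 ≤ k) (he : k % 2 = 0) :
    rec n k = rec (n / 2) (k / 2) := by
  rw [rec]
  have h0 : ¬ k = 0 := by omega
  have h1 : ¬ k = 1 := by omega
  have h2 : ¬ k < 2 := by omega
  simp only [h0, h1, h2, if_false, dif_neg, not_false_iff]
  have hgt : pyFloorHalf (k - 1) < pyCeilHalf (k - 1) := by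
    simp only [pyCeilHalf, pyFloorHalf, fd2_eq]; omega
  rw [if_pos hgt]
  have e1 : pyCeilHalf (n - 1) = n / 2 := by
    simp only [pyCeilHalf, fd2_eq]; omega
  have e2 : pyCeilHalf (k - 1) = k / 2 := by
    simp only [pyCeilHalf, fd2_eq]; omega
  rw [e1, e2]

-- A, k odd ≥ 2: a_k = b_k, both remaining branches land on ((n-1)/2, (k-1)/2)
theorem rec_step_odd (n k : Int) (hk : 2 ≤ k) (ho : k % 2 = 1) :
    rec n k = rec ((n - 1) / 2) ((k - 1) / 2) := by
  rw [rec]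
  have h0 : ¬ k = 0 := by omega
  have h1 : ¬ k = 1 := by omega
  have h2 : ¬ k < 2 := by omega
  simp only [h0, h1, h2, if_false, dif_neg, not_false_iff]
  have hgt : ¬ pyFloorHalf (k - 1) < pyCeilHalf (k - 1) := by
    simp only [pyCeilHalf, pyFloorHalf, fd2_eq]; omega
  rw [if_neg hgt]
  have ek : pyCeilHalf (k - 1) = (k - 1) / 2 := by
    simp only [pyCeilHalf, fd2_eq]; omega
  by_cases hn : pyFloorHalf (n - 1) < pyCeilHalf (n - 1)
  · rw [if_pos hn]
    have : pyFloorHalf (n - 1) = (n - 1) / 2 := by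
      simp only [pyFloorHalf, fd2_eq]
    rw [this]
    have ek' : pyFloorHalf (k - 1) = (k - 1) / 2 := by
      simp only [pyFloorHalf, fd2_eq]
    rw [ek']
  · rw [if_neg hn]
    have en : pyCeilHalf (n - 1) = (n - 1) / 2 := by
      simp only [pyCeilHalf, pyFloorHalf, fd2_eq] at hn ⊢; omega
    rw [en, ek]

theorem loop_step_even (n k : Int) (hk : 2 ≤ k) (he : k % 2 = 0) :
    recAltLoop n k = recAltLoop (n / 2) (k / 2) := by
  rw [recAltLoop]
  have h1 : (1:Int) < k := by omega
  have hm : ¬ PySem.Int.mod k 2 ≠ 0 := by rw [md2_eq]; omega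
  rw [dif_pos h1, if_neg hm, fd2_eq, fd2_eq]

theorem loop_step_odd (n k : Int) (hk : 2 ≤ k) (ho : k % 2 = 1) :
    recAltLoop n k = recAltLoop ((n - 1) / 2) ((k - 1) / 2) := by
  rw [recAltLoop]
  have h1 : (1:Int) < k := by omega
  have hm : PySem.Int.mod k 2 ≠ 0 := by rw [md2_eq]; omega
  rw [dif_pos h1, if_pos hm, fd2_eq, fd2_eq]

theorem alt_congr (n n' k k' : Int) (hk : k ≠ 0) (hk' : k' ≠ 0)
    (h : recAltLoop n k = recAltLoop n' k') : rec_alt n k = rec_alt n' k' := by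
  rw [rec_alt, rec_alt, if_neg hk, if_neg hk', h]

theorem rec_eq_alt : ∀ (N : Nat) (n k : Int), 0 ≤ k → k.toNat ≤ N → rec n k = rec_alt n k := by
  intro N
  induction N with
  | zero =>
    intro n k h0 hN
    have : k = 0 := by omega
    subst this
    rw [rec, rec_alt]; simp
  | succ N ih =>
    intro n k h0 hN
    by_cases hk0 : k = 0
    · subst hk0; rw [rec, rec_alt]; simp
    by_cases hk1 : k = 1
    · subst hk1
      rw [rec, rec_alt, recAltLoop]
      simp only [pyCeilHalf, pyFloorHalf, fd2_eq]
      norm_num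
      omega
    have hk2 : 2 ≤ k := by omega
    rcases Int.emod_two_eq k with he | ho
    · rw [rec_step_even n k hk2 he,
        ih (n / 2) (k / 2) (by omega) (by omega)]
      exact alt_congr _ _ _ _ (by omega) hk0 (loop_step_even n k hk2 he).symm
    · rw [rec_step_odd n k hk2 ho,
        ih ((n - 1) / 2) ((k - 1) / 2) (by omega) (by omega)]
      exact alt_congr _ _ _ _ (by omega) hk0 (loop_step_odd n k hk2 ho).symm

-- ===== VERDICT (by name: the statement is the Claim_ definition above) =====
theorem rec_spec : Claim_equal_rec := by
  intro n k _ hpre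
  exact rec_eq_alt k.toNat n k hpre le_rfl
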